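-- pv_equiv track=rewrite | github.com/SeoHyungjun/Coding_Test | programmers/2018카카오블라인드채용/3차/n진수게임/n진수게임.py | solution
-- ===== SOURCE A (Python) =====
-- def change_num(num, zinbub):
--     result = ''
--     over = {10:'A', 11:'B', 12:'C', 13:'D', 14:'E', 15:'F'}
--
--     if num == 0:
--         return '0'
--     while num != 0:
--         if num%zinbub < 10:
--             result += str(num%zinbub)
--         else:
--             result += over[num%zinbub]
--         num //= zinbub
--
--     return result[::-1]
--
-- def solution(n, t, m, p):
--     answer = ''
--
--     # n 진법, 대답 길이 t, 총 인원 m, 튜브 순서 p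
--     result = ''
--     start = 0
--
--     while m*t > len(result):
--         result += change_num(start, n)
--         start += 1
--
--     for i in range(p-1, t*m + p - 1, m):
--         answer += result[i]
--
--
--     return answer
-- ===== SOURCE B (Python) =====
-- def solution(n, t, m, p):
--     # Locate each wanted digit directly in the concatenated base-n stream of
--     # 0,1,2,... by skipping whole blocks of equal-length numbers: no big string.
--     digits = '0123456789ABCDEF'
--     out = []
--     for i in range(t):
--         idx = p - 1 + i * m          # global position in the digit stream
--         L = 1                        # current number-length block
--         first = 0                    # first number of the block
--         block = n                    # total digits contributed by the block
--         while idx >= block: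
--             idx -= block
--             L += 1
--             first = n ** (L - 1)
--             block = L * (n ** L - n ** (L - 1))
--         num = first + idx // L       # the number containing the digit
--         off = idx % L                # digit offset inside that number (msd first)
--         d = (num // n ** (L - 1 - off)) % n
--         out.append(digits[d])
--     return ''.join(out)
-- ===== Notes on version B (the rewrite author's own statement) =====
-- stated objective: faster
-- what changed: Instead of materialising the whole concatenated base-n digit string of 0,1,2,... up to m*t characters and then indexing into it, B computes each of the t sampled positions directly: it skips whole blocks of equal-length numbers arithmetically, identifies the single number containing the digit, and extracts that digit with division/modulus.
-- outside the precondition, e.g. on solution(2, 1, 1, 0): A returns '0', B returns '1'; on solution(2, 2, 2, 0): A returns '01', B returns '11'; on solution(2, 1, 5, 6): A returns '1', B returns '1'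
import Mathlib
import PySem

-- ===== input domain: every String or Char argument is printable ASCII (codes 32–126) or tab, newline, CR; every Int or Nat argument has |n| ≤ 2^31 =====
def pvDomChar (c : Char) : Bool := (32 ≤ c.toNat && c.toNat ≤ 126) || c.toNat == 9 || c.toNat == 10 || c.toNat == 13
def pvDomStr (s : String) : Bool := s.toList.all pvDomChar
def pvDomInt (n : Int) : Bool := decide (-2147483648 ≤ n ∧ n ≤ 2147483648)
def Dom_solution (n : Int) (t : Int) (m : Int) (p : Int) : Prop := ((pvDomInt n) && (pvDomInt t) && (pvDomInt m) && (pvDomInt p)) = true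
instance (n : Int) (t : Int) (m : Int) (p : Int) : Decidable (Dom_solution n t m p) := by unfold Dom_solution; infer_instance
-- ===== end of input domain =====

-- B locates each sampled digit arithmetically by skipping whole blocks of equal-length numbers
-- instead of building the concatenated base-n digit string and indexing it (different algorithm, fewer digits touched).


-- ===== PORT A =====
-- the dict literal 'over' of change_num
def pvOver : PySem.Dict Int String :=
  PySem.Dict.ofList [(10, "A"), (11, "B"), (12, "C"), (13, "D"), (14, "E"), (15, "F")]

-- 'while num != 0' loop of change_num; fuel only makes the same computation total
-- (num.natAbs + 1 iterations always suffice on the inputs Pre_ admits).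
-- 'over[…]' with a missing key is KeyError; '.getD ""' stands where Python raises (outside Pre_).
def changeNumLoop (fuel : Nat) (num zinbub : Int) (result : String) : String :=
  match fuel with
  | 0 => result
  | fuel + 1 =>
    if num ≠ 0 then
      let result :=
        if PySem.Int.mod num zinbub < 10 then result ++ PySem.Int.toStr (PySem.Int.mod num zinbub)
        else result ++ ((pvOver.get? (PySem.Int.mod num zinbub)).getD "")
      changeNumLoop fuel (PySem.Int.floordiv num zinbub) zinbub result
    else result

def changeNum (num zinbub : Int) : String :=
  if num = 0 then "0"
  else (PySem.Str.slice? (changeNumLoop (num.natAbs + 1) num zinbub "") none none (-1)).getD ""  -- result[::-1]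

-- 'while m*t > len(result)' loop of solution; fuel only makes the same computation total
-- ((m*t).toNat + 1 iterations always suffice on the inputs Pre_ admits).
def buildLoop (fuel : Nat) (n m t : Int) (start : Int) (result : String) : String :=
  match fuel with
  | 0 => result
  | fuel + 1 =>
    if m * t > PySem.Str.len result then
      buildLoop fuel n m t (start + 1) (result ++ changeNum start n)
    else result

-- 'result[i]' out of range is IndexError; the 'none' branch stands where Python raises (outside Pre_).
def solution (n : Int) (t : Int) (m : Int) (p : Int) : String :=
  let result := buildLoop ((m * t).toNat + 1) n m t 0 ""
  (PySem.List.pyRange (p - 1) (t * m + p - 1) m).foldl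
    (fun answer i =>
      match PySem.Str.pyGet? result i with
      | some c => answer.push c
      | none => answer) ""

-- ===== PORT B =====
-- 'while idx >= block' loop of Source B; fuel only makes the same computation total
-- (idx.toNat + 1 iterations always suffice on the inputs Pre_ admits).
-- 'n ** e' is ported as 'n ^ e.toNat': every exponent reached under Pre_ is nonnegative (L ≥ 1, off < L).
def locLoop (fuel : Nat) (n idx L first block : Int) : Int × Int × Int :=
  match fuel with
  | 0 => (idx, L, first)
  | fuel + 1 =>
    if idx ≥ block then
      locLoop fuel n (idx - block) (L + 1) (n ^ (L + 1 - 1).toNat)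
        ((L + 1) * (n ^ (L + 1).toNat - n ^ (L + 1 - 1).toNat))
    else (idx, L, first)

-- 'digits[d]' out of range is IndexError; the 'none' branch stands where Python raises (outside Pre_).
def solution_alt (n : Int) (t : Int) (m : Int) (p : Int) : String :=
  String.ofList ((PySem.List.pyRange 0 t 1).foldl (fun out i =>
    let idx := p - 1 + i * m
    let st := locLoop (idx.toNat + 1) n idx 1 0 n
    let num := st.2.2 + PySem.Int.floordiv st.1 st.2.1
    let off := PySem.Int.mod st.1 st.2.1
    let d := PySem.Int.mod (PySem.Int.floordiv num (n ^ (st.2.1 - 1 - off).toNat)) n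
    match PySem.Str.pyGet? "0123456789ABCDEF" d with
    | some c => out ++ [c]
    | none => out) [])

-- ===== PRECONDITION & SPEC =====
-- Pre_ is the problem's natural domain (base 2..16, at least one player, player index 1..m) plus the
-- degenerate t ≤ 0 inputs on which A's answer loop is empty and A returns "". Outside it A raises
-- (ZeroDivisionError/KeyError/IndexError/ValueError), diverges (n ≤ 1 with m*t > 1), or returns only
-- through Python's accidental negative-index wraparound (p ≤ 0) or an accidental overshoot of the
-- built string (p > m, n > 16) — see claim.json cites.
def Pre_solution (n : Int) (t : Int) (m : Int) (p : Int) : Prop :=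
  (2 ≤ n ∧ n ≤ 16 ∧ 1 ≤ m ∧ 1 ≤ p ∧ p ≤ m) ∨
  (t ≤ 0 ∧ m ≠ 0 ∧ (2 ≤ n ∨ m * t ≤ 1) ∧ (n ≤ 16 ∨ m * t ≤ 16))
instance (n : Int) (t : Int) (m : Int) (p : Int) : Decidable (Pre_solution n t m p) := by
  unfold Pre_solution; infer_instance
def pvWitness_solution : Int × Int × Int × Int := (2, 4, 2, 1)

def Spec_solution (n : Int) (t : Int) (m : Int) (p : Int) (out : String) : Prop := out = solution_alt n t m p
instance (n : Int) (t : Int) (m : Int) (p : Int) (out : String) : Decidable (Spec_solution n t m p out) := by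
  unfold Spec_solution; infer_instance

-- ===== CLAIM (what is proved, stated in full; the proofs are below) =====
def Claim_equal_solution : Prop := ∀ (n : Int) (t : Int) (m : Int) (p : Int),
  Dom_solution n t m p → Pre_solution n t m p → Spec_solution n t m p (solution n t m p)

-- ===== LEMMAS AND PROOFS =====

-- digit d as the character Python's mapping (str(d) for d<10, the 'over' dict above) produces
def dchar (d : Nat) : Char := "0123456789ABCDEF".toList.getD d '?'

-- the base-b digit characters of k, most significant first ('0' for k = 0)
def digitsOf (b k : Nat) : List Char :=
  if k = 0 then ['0'] else ((Nat.digits b k).map dchar).reverse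

-- the concatenated digit stream of the numbers 0, 1, …, K-1
def stream (b K : Nat) : List Char := (List.range K).flatMap (digitsOf b)

lemma digitsOf_ne_nil (b k : Nat) : digitsOf b k ≠ [] := by
  unfold digitsOf
  split
  · simp
  · simpa using (Nat.digits_ne_nil_iff_ne_zero).2 ‹¬ k = 0›

-- the character of the infinite digit stream of a, a+1, a+2, … at position idx
def sref (b : Nat) (a idx : Nat) : Char :=
  if h : idx < (digitsOf b a).length then (digitsOf b a)[idx]
  else sref b (a + 1) (idx - (digitsOf b a).length)
termination_by idx
decreasing_by
  have h1 : (digitsOf b a).length ≠ 0 := by simpa using digitsOf_ne_nil b a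
  omega

lemma length_digitsOf_block (b ℓ k : Nat) (hb : 2 ≤ b) (hℓ : 1 ≤ ℓ)
    (hlo : (if ℓ = 1 then 0 else b ^ (ℓ - 1)) ≤ k) (hhi : k < b ^ ℓ) :
    (digitsOf b k).length = ℓ := by
  unfold digitsOf
  by_cases hk : k = 0
  · subst hk
    by_cases h1 : ℓ = 1
    · simp [h1]
    · exfalso
      rw [if_neg h1] at hlo
      have := Nat.pow_pos (show 0 < b by omega) (n := ℓ - 1)
      omega
  · rw [if_neg hk, List.length_reverse, List.length_map,
      Nat.digits_len b k (by omega) hk]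
    have hlog : Nat.log b k = ℓ - 1 := by
      apply Nat.log_eq_of_pow_le_of_lt_pow
      · by_cases h1 : ℓ = 1
        · simpa [h1] using Nat.one_le_iff_ne_zero.mpr hk
        · rw [if_neg h1] at hlo; exact hlo
      · have : ℓ - 1 + 1 = ℓ := by omega
        rw [this]; exact hhi
    omega

lemma digitsOf_getD (b ℓ k off : Nat) (hb : 2 ≤ b) (hlen : (digitsOf b k).length = ℓ)
    (hoff : off < ℓ) : (digitsOf b k).getD off '?' = dchar (k / b ^ (ℓ - 1 - off) % b) := by
  unfold digitsOf at *
  by_cases hk : k = 0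
  · subst hk
    rw [if_pos rfl] at hlen ⊢
    simp at hlen
    have hoff0 : off = 0 := by omega
    subst hoff0
    rw [Nat.zero_div, Nat.zero_mod]
    rfl
  · rw [if_neg hk] at hlen ⊢
    have hofflt : off < ((Nat.digits b k).map dchar).reverse.length := by rw [hlen]; exact hoff
    rw [List.getD_eq_getElem _ _ hofflt, List.getElem_reverse]
    have hlen' : ((Nat.digits b k).map dchar).length = ℓ := by
      simpa using hlen
    have hj : ((Nat.digits b k).map dchar).length - 1 - off < (Nat.digits b k).length := by
      rw [hlen']
      have : (Nat.digits b k).length = ℓ := by simpa using hlen'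
      omega
    rw [List.getElem_map, ← List.getD_eq_getElem (Nat.digits b k) 0 hj,
      Nat.getD_digits k _ hb, hlen']

lemma stream_getD_eq_sref (b : Nat) : ∀ (K a idx : Nat),
    idx < ((List.range' a K).flatMap (digitsOf b)).length →
    ((List.range' a K).flatMap (digitsOf b)).getD idx '?' = sref b a idx := by
  intro K
  induction K with
  | zero => intro a idx h; simp at h
  | succ K ih =>
    intro a idx h
    rw [List.range'_succ, List.flatMap_cons] at h ⊢
    rw [sref]
    by_cases hlt : idx < (digitsOf b a).length
    · rw [dif_pos hlt, List.getD_append _ _ _ _ hlt, List.getD_eq_getElem _ _ hlt]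
    · rw [dif_neg hlt]
      rw [List.getD_append_right _ _ _ _ (by omega)]
      apply ih
      simp only [List.length_append] at h
      omega

lemma sref_skip (b L : Nat) : ∀ (c a idx : Nat),
    (∀ j < c, (digitsOf b (a + j)).length = L) → c * L ≤ idx →
    sref b a idx = sref b (a + c) (idx - c * L) := by
  intro c
  induction c with
  | zero => intro a idx _ _; simp
  | succ c ih =>
    intro a idx hlen hle
    rw [Nat.succ_mul] at hle
    have h0 : (digitsOf b (a + 0)).length = L := hlen 0 (by omega)
    simp only [Nat.add_zero] at h0
    rw [sref, dif_neg (by omega), h0]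
    have := ih (a + 1) (idx - L) (fun j hj => by
      have := hlen (j + 1) (by omega)
      simpa [Nat.add_assoc, Nat.add_comm 1 j] using this) (by omega)
    rw [this, Nat.succ_mul]
    congr 1 <;> omega

lemma sref_in_block (b L : Nat) (hL : 0 < L) : ∀ (q a c r : Nat), r < L → q < c →
    (∀ j < c, (digitsOf b (a + j)).length = L) →
    sref b a (q * L + r) = (digitsOf b (a + q)).getD r '?' := by
  intro q
  induction q with
  | zero =>
    intro a c r hr _ hlen
    have h0 : (digitsOf b (a + 0)).length = L := hlen 0 (by omega)
    simp only [Nat.add_zero] at h0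
    rw [Nat.zero_mul, Nat.zero_add, Nat.add_zero, sref, dif_pos (by omega),
      List.getD_eq_getElem _ _ (by omega)]
  | succ q ih =>
    intro a c r hr hq hlen
    have h0 : (digitsOf b (a + 0)).length = L := hlen 0 (by omega)
    simp only [Nat.add_zero] at h0
    rw [Nat.succ_mul]
    have harr : q * L + L + r = (q * L + r) + L := by omega
    rw [harr, sref, dif_neg (by omega), h0]
    have hrec := ih (a + 1) (c - 1) r hr (by omega) (fun j hj => by
      have := hlen (j + 1) (by omega)
      simpa [Nat.add_assoc, Nat.add_comm 1 j] using this)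
    have : q * L + r + L - L = q * L + r := by omega
    rw [this, hrec]
    congr 2
    omega

lemma charA_eq (d : Nat) (hd : d < 16) (acc : String) :
    (if (d : Int) < 10 then acc ++ PySem.Int.toStr (d : Int)
     else acc ++ ((pvOver.get? (d : Int)).getD "")).toList = acc.toList ++ [dchar d] := by
  by_cases h : (d : Int) < 10
  · rw [if_pos h]
    have hd10 : d < 10 := by exact_mod_cast h
    have hx : (PySem.Int.toStr (d : Int)).toList = [dchar d] := by
      interval_cases d <;> decide
    simp [hx]
  · rw [if_neg h]
    have hd10 : 10 ≤ d := by
      have := not_lt.mp h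
      exact_mod_cast this
    have hx : ((pvOver.get? (d : Int)).getD "").toList = [dchar d] := by
      interval_cases d <;> decide
    simp [hx]

lemma changeNumLoop_spec (z : Nat) (hz : 2 ≤ z) (hz16 : z ≤ 16) :
    ∀ (k fuel : Nat) (acc : String), k ≤ fuel →
    (changeNumLoop fuel (k : Int) (z : Int) acc).toList = acc.toList ++ (Nat.digits z k).map dchar := by
  intro k
  induction k using Nat.strong_induction_on with
  | _ k ih =>
    intro fuel acc hfuel
    match fuel with
    | 0 =>
      have hk0 : k = 0 := by omega
      subst hk0
      simp [changeNumLoop]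
    | fuel + 1 =>
      by_cases hk : k = 0
      · subst hk
        simp [changeNumLoop]
      · rw [changeNumLoop, if_pos (by exact_mod_cast hk)]
        simp only [PySem.Int.mod_natCast, PySem.Int.floordiv_natCast]
        have hdiv : k / z < k := Nat.div_lt_self (by omega) (by omega)
        rw [ih (k / z) hdiv fuel _ (by omega)]
        rw [charA_eq (k % z) (by have := Nat.mod_lt k (show 0 < z by omega); omega) acc]
        rw [Nat.digits_def' (show 1 < z by omega) (show 0 < k by omega)]
        simp

lemma changeNum_spec (b : Nat) (hb : 2 ≤ b) (hb16 : b ≤ 16) (k : Nat) :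
    (changeNum (k : Int) (b : Int)).toList = digitsOf b k := by
  unfold changeNum
  by_cases hk : k = 0
  · subst hk
    rw [if_pos (by norm_num)]
    rfl
  · rw [if_neg (by exact_mod_cast hk)]
    rw [PySem.Str.slice?_none_none_neg_one, Option.getD_some]
    have hcl := changeNumLoop_spec b hb hb16 k (((k : Int).natAbs) + 1) ""
      (by simp [Int.natAbs_natCast])
    simp only [String.toList_ofList, hcl]
    simp [digitsOf, hk]

lemma buildLoop_spec (b : Nat) (hb : 2 ≤ b) (hb16 : b ≤ 16) (m t : Int) : ∀ (fuel s : Nat) (result : String),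
    result.toList = stream b s → (m * t).toNat ≤ (stream b s).length + fuel →
    ∃ K, (buildLoop fuel (b : Int) m t (s : Int) result).toList = stream b K ∧
      m * t ≤ ((stream b K).length : Int) := by
  intro fuel
  induction fuel with
  | zero =>
    intro s result hres hlen
    refine ⟨s, by simpa [buildLoop] using hres, ?_⟩
    omega
  | succ fuel ih =>
    intro s result hres hlen
    rw [buildLoop]
    by_cases hc : m * t > PySem.Str.len result
    · rw [if_pos hc]
      have hnew : (result ++ changeNum (s : Int) (b : Int)).toList = stream b (s + 1) := by
        rw [String.toList_append, hres, changeNum_spec b hb hb16 s]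
        simp [stream, List.range_succ]
      have hlenpos : 0 < (digitsOf b s).length :=
        List.length_pos_of_ne_nil (digitsOf_ne_nil b s)
      have hlen' : (stream b (s + 1)).length = (stream b s).length + (digitsOf b s).length := by
        simp [stream, List.range_succ]
      have hcast : ((s : Int) + 1) = ((s + 1 : Nat) : Int) := by push_cast; ring
      rw [hcast]
      exact ih (s + 1) _ hnew (by omega)
    · rw [if_neg hc]
      refine ⟨s, hres, ?_⟩
      rw [not_lt, PySem.Str.len_eq, hres] at hc
      exact hc

-- first number / number count / digit count of the block of numbers whose base-b form has ℓ digits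
def fstN (b ℓ : Nat) : Nat := if ℓ = 1 then 0 else b ^ (ℓ - 1)
def cntN (b ℓ : Nat) : Nat := if ℓ = 1 then b else b ^ ℓ - b ^ (ℓ - 1)

lemma fstN_succ (b ℓ : Nat) (hb : 2 ≤ b) (hℓ : 1 ≤ ℓ) : fstN b (ℓ + 1) = fstN b ℓ + cntN b ℓ := by
  unfold fstN cntN
  have hle : b ^ (ℓ - 1) ≤ b ^ ℓ := Nat.pow_le_pow_right (by omega) (by omega)
  by_cases h1 : ℓ = 1
  · subst h1; simp
  · rw [if_neg (by omega), if_neg h1, if_neg h1]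
    have : ℓ + 1 - 1 = ℓ := by omega
    rw [this]
    omega

lemma length_in_blockN (b ℓ : Nat) (hb : 2 ≤ b) (hℓ : 1 ≤ ℓ) :
    ∀ j < cntN b ℓ, (digitsOf b (fstN b ℓ + j)).length = ℓ := by
  intro j hj
  apply length_digitsOf_block b ℓ _ hb hℓ
  · unfold fstN
    split <;> omega
  · unfold fstN cntN at *
    by_cases h1 : ℓ = 1
    · subst h1; simpa using hj
    · rw [if_neg h1] at hj ⊢
      have hle : b ^ (ℓ - 1) ≤ b ^ ℓ := Nat.pow_le_pow_right (by omega) (by omega)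
      omega

lemma cntN_pos (b ℓ : Nat) (hb : 2 ≤ b) (hℓ : 1 ≤ ℓ) : 0 < cntN b ℓ := by
  unfold cntN
  by_cases h1 : ℓ = 1
  · rw [if_pos h1]; omega
  · rw [if_neg h1]
    have : b ^ (ℓ - 1) < b ^ ℓ := Nat.pow_lt_pow_right (by omega) (by omega)
    omega

lemma locLoop_spec (b : Nat) (hb : 2 ≤ b) : ∀ (fuel ℓ i : Nat), 1 ≤ ℓ → i + 1 ≤ fuel →
    ∃ ℓ' i', 1 ≤ ℓ' ∧ i' < ℓ' * cntN b ℓ' ∧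
      locLoop fuel (b : Int) (i : Int) (ℓ : Int) ((fstN b ℓ : Nat) : Int) ((ℓ * cntN b ℓ : Nat) : Int)
        = ((i' : Int), (ℓ' : Int), ((fstN b ℓ' : Nat) : Int)) ∧
      sref b (fstN b ℓ') i' = sref b (fstN b ℓ) i := by
  intro fuel
  induction fuel with
  | zero => intro ℓ i _ h; omega
  | succ fuel ih =>
    intro ℓ i hℓ hfuel
    rw [locLoop]
    by_cases hge : ℓ * cntN b ℓ ≤ i
    · rw [if_pos (by exact_mod_cast hge)]
      have hblkpos : 0 < ℓ * cntN b ℓ := Nat.mul_pos (by omega) (cntN_pos b ℓ hb hℓ)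
      have harg1 : ((i : Int) - ((ℓ * cntN b ℓ : Nat) : Int)) = ((i - ℓ * cntN b ℓ : Nat) : Int) := by
        omega
      have harg2 : ((ℓ : Int) + 1) = ((ℓ + 1 : Nat) : Int) := by push_cast; ring
      have harg3 : (((ℓ : Int) + 1 - 1).toNat) = ℓ := by omega
      have hple : b ^ ℓ ≤ b ^ (ℓ + 1) := Nat.pow_le_pow_right (by omega) (by omega)
      have harg4 : ((b : Int) ^ ℓ) = ((fstN b (ℓ + 1) : Nat) : Int) := by
        unfold fstN
        rw [if_neg (by omega)]
        push_cast
        norm_num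
      have harg5 : (((ℓ : Int) + 1).toNat) = ℓ + 1 := by omega
      have harg6 : ((ℓ : Int) + 1) * ((b : Int) ^ (ℓ + 1) - (b : Int) ^ ℓ)
          = (((ℓ + 1) * cntN b (ℓ + 1) : Nat) : Int) := by
        unfold cntN
        rw [if_neg (by omega)]
        have : ℓ + 1 - 1 = ℓ := by omega
        rw [this]
        push_cast [Nat.cast_sub hple]
        ring
      rw [harg1, harg3, harg5, harg6, harg4, harg2]
      obtain ⟨ℓ', i', hℓ', hlt', heq', hsref'⟩ :=
        ih (ℓ + 1) (i - ℓ * cntN b ℓ) (by omega) (by omega)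
      refine ⟨ℓ', i', hℓ', hlt', heq', ?_⟩
      rw [hsref']
      rw [sref_skip b ℓ (cntN b ℓ) (fstN b ℓ) i (length_in_blockN b ℓ hb hℓ)
        (by rw [Nat.mul_comm] at hge; exact hge)]
      rw [← fstN_succ b ℓ hb hℓ, Nat.mul_comm]
    · rw [if_neg (by exact_mod_cast hge)]
      exact ⟨ℓ, i, hℓ, by omega, rfl, rfl⟩

lemma extract_spec (b ℓ i : Nat) (hb : 2 ≤ b) (hℓ : 1 ≤ ℓ) (hi : i < ℓ * cntN b ℓ) :
    sref b (fstN b ℓ) i = dchar ((fstN b ℓ + i / ℓ) / b ^ (ℓ - 1 - i % ℓ) % b) := by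
  have hq : i / ℓ < cntN b ℓ := by
    rw [Nat.div_lt_iff_lt_mul (by omega)]
    rw [Nat.mul_comm] at hi
    exact hi
  have hr : i % ℓ < ℓ := Nat.mod_lt i (by omega)
  have hdm : ℓ * (i / ℓ) + i % ℓ = i := Nat.div_add_mod i ℓ
  have hib := sref_in_block b ℓ (by omega) (i / ℓ) (fstN b ℓ) (cntN b ℓ) (i % ℓ) hr hq
    (length_in_blockN b ℓ hb hℓ)
  rw [Nat.mul_comm (i / ℓ) ℓ, hdm] at hib
  rw [hib]
  exact digitsOf_getD b ℓ (fstN b ℓ + i / ℓ) (i % ℓ) hb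
    (length_in_blockN b ℓ hb hℓ (i / ℓ) hq) hr

lemma pyGet_digits (d : Nat) (hd : d < 16) :
    PySem.Str.pyGet? "0123456789ABCDEF" ((d : Nat) : Int) = some (dchar d) := by
  rw [PySem.Str.pyGet?_natCast]
  have hlen : ("0123456789ABCDEF".toList).length = 16 := by decide
  rw [List.getElem?_eq_getElem (by omega)]
  unfold dchar
  rw [List.getD_eq_getElem _ _ (by omega)]

lemma foldl_push_get (l : List Int) (r : String) (g : Int → Char)
    (h : ∀ x ∈ l, PySem.Str.pyGet? r x = some (g x)) : ∀ (s : String),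
    (l.foldl (fun ans i =>
      match PySem.Str.pyGet? r i with
      | some c => ans.push c
      | none => ans) s).toList = s.toList ++ l.map g := by
  revert h
  induction l with
  | nil => intro _ s; simp
  | cons x xs ih =>
    intro h s
    simp only [List.foldl_cons, List.map_cons]
    rw [h x (by simp)]
    rw [ih (fun y hy => h y (by simp [hy])) (s.push (g x))]
    simp [String.toList_push]

lemma bstep (b : Nat) (hb2 : 2 ≤ b) (hb16 : b ≤ 16) (idx : Int) (hidx : 0 ≤ idx) (out : List Char) :
    (let st := locLoop (idx.toNat + 1) (b : Int) idx 1 0 (b : Int)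
     let num := st.2.2 + PySem.Int.floordiv st.1 st.2.1
     let off := PySem.Int.mod st.1 st.2.1
     let d := PySem.Int.mod (PySem.Int.floordiv num ((b : Int) ^ (st.2.1 - 1 - off).toNat)) (b : Int)
     match PySem.Str.pyGet? "0123456789ABCDEF" d with
     | some c => out ++ [c]
     | none => out) = out ++ [sref b 0 idx.toNat] := by
  obtain ⟨ℓ', i', hℓ', hlt', heq, hsref⟩ :=
    locLoop_spec b hb2 (idx.toNat + 1) 1 idx.toNat (by omega) (by omega)
  have hcast1 : ((idx.toNat : Nat) : Int) = idx := Int.toNat_of_nonneg hidx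
  have hfst1 : fstN b 1 = 0 := rfl
  have hcnt1 : 1 * cntN b 1 = b := by simp [cntN]
  rw [hcast1, hfst1, hcnt1] at heq
  simp only [Nat.cast_zero, Nat.cast_one] at heq
  simp only [heq]
  have hmodlt : i' % ℓ' < ℓ' := Nat.mod_lt i' (by omega)
  have hnum : ((fstN b ℓ' : Nat) : Int) + PySem.Int.floordiv (i' : Int) (ℓ' : Int)
      = ((fstN b ℓ' + i' / ℓ' : Nat) : Int) := by
    rw [PySem.Int.floordiv_natCast]
    push_cast
    ring
  have hoff : PySem.Int.mod (i' : Int) (ℓ' : Int) = ((i' % ℓ' : Nat) : Int) := by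
    rw [PySem.Int.mod_natCast]
  have hexp : (((ℓ' : Nat) : Int) - 1 - ((i' % ℓ' : Nat) : Int)).toNat = ℓ' - 1 - i' % ℓ' := by
    omega
  rw [hnum, hoff, hexp]
  have hpow : ((b : Int) ^ (ℓ' - 1 - i' % ℓ')) = ((b ^ (ℓ' - 1 - i' % ℓ') : Nat) : Int) := by
    push_cast
    ring
  rw [hpow, PySem.Int.floordiv_natCast, PySem.Int.mod_natCast]
  have hdlt : (fstN b ℓ' + i' / ℓ') / b ^ (ℓ' - 1 - i' % ℓ') % b < 16 :=
    lt_of_lt_of_le (Nat.mod_lt _ (by omega)) hb16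
  rw [pyGet_digits _ hdlt]
  rw [← extract_spec b ℓ' i' hb2 hℓ' hlt', hsref]
  rfl

-- ===== VERDICT (by name: the statement is the Claim_ definition above) =====
theorem solution_spec : Claim_equal_solution := by
  intro n t m p _ hpre
  unfold Spec_solution
  rcases hpre with ⟨hn2, hn16, hm, hp1, hpm⟩ | ⟨ht, hm0, -, -⟩
  case inr =>
    -- t ≤ 0: both index lists are empty and both sides return ""
    unfold solution solution_alt
    dsimp only
    have hB : PySem.List.pyRange 0 t 1 = [] := PySem.List.pyRange_one_eq_nil (by omega)
    have hA : PySem.List.pyRange (p - 1) (t * m + p - 1) m = [] := by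
      rcases lt_or_gt_of_ne hm0 with hneg | hpos
      · have htm : 0 ≤ t * m := by nlinarith
        unfold PySem.List.pyRange
        rw [if_neg (show ¬ m = 0 by omega), if_neg (show ¬ (0 : Int) < m by omega),
          if_neg (show ¬ t * m + p - 1 < p - 1 by omega)]
        rfl
      · have htm : t * m ≤ 0 := by nlinarith
        rw [PySem.List.pyRange_of_pos _ _ hpos,
          if_neg (show ¬ (p - 1 < t * m + p - 1) by omega)]
        rfl
    rw [hA, hB]
    rfl
  case inl =>
    obtain ⟨b, rfl⟩ : ∃ b : Nat, n = (b : Int) := ⟨n.toNat, by omega⟩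
    have hb2 : 2 ≤ b := by exact_mod_cast hn2
    have hb16 : b ≤ 16 := by exact_mod_cast hn16
    unfold solution solution_alt
    dsimp only
    obtain ⟨K, hK, hKlen⟩ := buildLoop_spec b hb2 hb16 m t ((m * t).toNat + 1) 0 ""
      (by rfl) (by simp [stream])
    simp only [Nat.cast_zero] at hK
    have strext : ∀ s u : String, s.toList = u.toList → s = u := by
      intro s u h
      calc s = String.ofList s.toList := by simp
      _ = String.ofList u.toList := by rw [h]
      _ = u := by simp
    apply strext
    -- A side: every sampled index is in range and reads sref
    have hGet : ∀ x ∈ PySem.List.pyRange (p - 1) (t * m + p - 1) m,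
        PySem.Str.pyGet? (buildLoop ((m * t).toNat + 1) (b : Int) m t 0 "") x
          = some (sref b 0 x.toNat) := by
      intro x hx
      rw [PySem.List.mem_pyRange_iff_of_pos (by omega)] at hx
      obtain ⟨hx1, hx2, hdvd⟩ := hx
      obtain ⟨j, hj⟩ := hdvd
      have hj0 : 0 ≤ j := by nlinarith
      have hjt : j ≤ t - 1 := by nlinarith
      have hxub : x ≤ m * t - 1 := by nlinarith
      have hx0 : 0 ≤ x := by omega
      have hxlt : x.toNat < (stream b K).length := by omega
      have hxx : x = ((x.toNat : Nat) : Int) := by omega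
      rw [hxx, PySem.Str.pyGet?_natCast, hK, List.getElem?_eq_getElem hxlt,
        ← List.getD_eq_getElem _ '?' hxlt]
      congr 1
      rw [show stream b K = (List.range' 0 K).flatMap (digitsOf b) from by
        rw [stream, List.range_eq_range']]
      apply stream_getD_eq_sref
      rw [show (List.range' 0 K).flatMap (digitsOf b) = stream b K from by
        rw [stream, List.range_eq_range']]
      exact hxlt
    rw [foldl_push_get _ _ _ hGet ""]
    -- B side: each loop body appends the located stream character
    have hstep : ∀ (out : List Char) (i : Int), i ∈ PySem.List.pyRange 0 t 1 →
        (fun (out : List Char) (i : Int) =>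
          let idx := p - 1 + i * m
          let st := locLoop (idx.toNat + 1) (b : Int) idx 1 0 (b : Int)
          let num := st.2.2 + PySem.Int.floordiv st.1 st.2.1
          let off := PySem.Int.mod st.1 st.2.1
          let d := PySem.Int.mod (PySem.Int.floordiv num ((b : Int) ^ (st.2.1 - 1 - off).toNat)) (b : Int)
          match PySem.Str.pyGet? "0123456789ABCDEF" d with
          | some c => out ++ [c]
          | none => out) out i
        = out ++ [sref b 0 (p - 1 + i * m).toNat] := by
      intro out i hi
      rw [PySem.List.mem_pyRange_one] at hi
      have him : 0 ≤ i * m := mul_nonneg hi.1 (by omega)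
      exact bstep b hb2 hb16 (p - 1 + i * m) (by omega) out
    have hfold : List.foldl (fun (out : List Char) (i : Int) =>
          let idx := p - 1 + i * m
          let st := locLoop (idx.toNat + 1) (b : Int) idx 1 0 (b : Int)
          let num := st.2.2 + PySem.Int.floordiv st.1 st.2.1
          let off := PySem.Int.mod st.1 st.2.1
          let d := PySem.Int.mod (PySem.Int.floordiv num ((b : Int) ^ (st.2.1 - 1 - off).toNat)) (b : Int)
          match PySem.Str.pyGet? "0123456789ABCDEF" d with
          | some c => out ++ [c]
          | none => out) [] (PySem.List.pyRange 0 t 1)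
        = List.map (fun i => sref b 0 (p - 1 + i * m).toNat) (PySem.List.pyRange 0 t 1) := by
      rw [PySem.List.foldl_congr_mem _ _ _ _ hstep, PySem.List.foldl_append_singleton_eq_map]
      rw [List.nil_append]
    have hmaps : "".toList ++ List.map (fun x => sref b 0 x.toNat)
          (PySem.List.pyRange (p - 1) (t * m + p - 1) m)
        = List.map (fun i => sref b 0 (p - 1 + i * m).toNat) (PySem.List.pyRange 0 t 1) := by
      rw [show ("".toList : List Char) = [] from rfl, List.nil_append]
      by_cases ht : t ≤ 0
      · have hA : PySem.List.pyRange (p - 1) (t * m + p - 1) m = [] := by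
          rw [PySem.List.pyRange_of_pos _ _ (by omega)]
          have hne : ¬ (p - 1 < t * m + p - 1) := by nlinarith
          rw [if_neg hne]
          rfl
        have hB : PySem.List.pyRange 0 t 1 = [] := PySem.List.pyRange_one_eq_nil (by omega)
        simp [hA, hB]
      · replace ht : 0 < t := by omega
        rw [PySem.List.pyRange_of_pos _ _ (show (0 : Int) < m by omega),
          PySem.List.pyRange_one 0 t]
        rw [if_pos (show p - 1 < t * m + p - 1 by nlinarith)]
        have hcnt : (t * m + p - 1 - (p - 1) + m - 1) / m = t := by
          rw [show t * m + p - 1 - (p - 1) + m - 1 = (m - 1) + t * m from by ring,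
            Int.add_mul_ediv_right _ _ (show m ≠ 0 by omega),
            Int.ediv_eq_zero_of_lt (by omega) (by omega)]
          ring
        rw [hcnt, show t - 0 = t from by ring]
        rw [List.map_map, List.map_map]
        apply List.map_congr_left
        intro k _
        simp only [Function.comp]
        rw [show p - 1 + m * (k : Int) = p - 1 + (0 + (k : Int)) * m from by ring]
    exact hmaps.trans (String.toList_ofList.trans hfold).symm
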